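-- pv_equiv track=rewrite | github.com/zealits/ResumeParser | services/evaluate.py | _score_theory_heuristic
-- ===== SOURCE A (Python) =====
-- from typing import Dict, Any, List, Optional, Tuple
--
-- def _normalize_text(value: Optional[str]) -> str:
--     if value is None:
--         return ""
--     return str(value).strip().lower()
--
-- def _score_theory_heuristic(questions: List[Dict[str, Any]], answers: List[str]) -> List[int]:
--     scores: List[int] = []
--     for idx in range(len(questions)):
--         ans = answers[idx] if idx < len(answers) else ""
--         word_count = len((_normalize_text(ans)).split())
--         if word_count == 0:
--             score = 0
--         elif word_count < 20:
--             score = 2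
--         elif word_count < 50:
--             score = 3
--         elif word_count < 100:
--             score = 4
--         else:
--             score = 5
--         scores.append(score)
--     return scores
-- ===== SOURCE B (Python) =====
-- from typing import Dict, Any, List, Optional, Tuple
--
-- THRESHOLDS = [1, 20, 50, 100]
-- SCORES = [0, 2, 3, 4, 5]
--
-- def _score_theory_heuristic(questions: List[Dict[str, Any]], answers: List[str]) -> List[int]:
--     # Count words with a character-level state machine (a word starts at a
--     # non-space char preceded by space/start), so normalize/strip/lower/split
--     # are unnecessary; map the count to a score by binary search in a
--     # sorted threshold table instead of an if-elif cascade.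
--     out: List[int] = []
--     for _q, ans in zip(questions, answers + [""] * (len(questions) - len(answers))):
--         wc = 0
--         prev_space = True
--         for c in ans:
--             if c.isspace():
--                 prev_space = True
--             else:
--                 if prev_space:
--                     wc += 1
--                 prev_space = False
--         lo, hi = 0, len(THRESHOLDS)
--         while lo < hi:
--             mid = (lo + hi) // 2
--             if wc < THRESHOLDS[mid]:
--                 hi = mid
--             else:
--                 lo = mid + 1
--         out.append(SCORES[lo])
--     return out
-- ===== Notes on version B (the rewrite author's own statement) =====
-- stated objective: alternative
-- what changed: B zips questions with a padded answers list, counts words by a character-level state machine (no normalize/strip/lower/split), and maps the count to a score by binary search in a sorted threshold table instead of A's if-elif cascade.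
import Mathlib
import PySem

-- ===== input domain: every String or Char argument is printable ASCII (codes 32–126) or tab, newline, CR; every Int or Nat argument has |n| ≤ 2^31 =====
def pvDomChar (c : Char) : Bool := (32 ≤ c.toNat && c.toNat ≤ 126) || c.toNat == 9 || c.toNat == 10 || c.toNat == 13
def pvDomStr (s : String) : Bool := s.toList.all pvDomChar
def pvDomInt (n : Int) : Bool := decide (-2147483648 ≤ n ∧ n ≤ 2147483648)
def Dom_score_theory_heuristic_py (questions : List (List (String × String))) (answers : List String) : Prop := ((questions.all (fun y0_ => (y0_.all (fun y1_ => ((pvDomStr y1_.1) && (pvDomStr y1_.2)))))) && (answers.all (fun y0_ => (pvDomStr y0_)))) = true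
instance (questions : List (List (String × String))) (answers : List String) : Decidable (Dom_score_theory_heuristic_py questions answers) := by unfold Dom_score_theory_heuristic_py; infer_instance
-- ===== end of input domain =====

-- B replaces normalize+split word counting by a character-level state machine and the
-- if-elif cascade by binary search in a sorted threshold table (objective: alternative).

-- ===== PORT A =====
def normalize_text_py (value : Option String) : String :=
  match value with
  | none => ""
  | some s => PySem.Str.lower (PySem.Str.strip s)

def score_theory_heuristic_py (questions : List (List (String × String))) (answers : List String) : List Int :=
  (PySem.List.pyRange 0 (PySem.List.len questions) 1).foldl
    (fun scores idx =>
      let ans := if idx < PySem.List.len answers then PySem.List.pyGetD answers idx "" else ""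
      let word_count := PySem.List.len (PySem.Str.split₀ (normalize_text_py (some ans)))
      let score : Int :=
        if word_count = 0 then 0
        else if word_count < 20 then 2
        else if word_count < 50 then 3
        else if word_count < 100 then 4
        else 5
      scores ++ [score]) []

-- ===== PORT B =====
def pvThresholds : List Int := [1, 20, 50, 100]
def pvScores : List Int := [0, 2, 3, 4, 5]

-- Source B's while-loop binary search; terminates because hi - lo shrinks
def pvBsearch (wc : Int) (lo hi : Nat) : Nat :=
  if _h : lo < hi then
    let mid := (lo + hi) / 2
    if wc < pvThresholds.getD mid 0 then pvBsearch wc lo mid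
    else pvBsearch wc (mid + 1) hi
  else lo
termination_by hi - lo
decreasing_by all_goals omega

def score_theory_heuristic_py_alt (questions : List (List (String × String))) (answers : List String) : List Int :=
  (questions.zip (answers ++ List.replicate (questions.length - answers.length) "")).foldl
    (fun out p =>
      let st := p.2.toList.foldl
        (fun (st : Int × Bool) c =>
          if PySem.Chars.isspace c then (st.1, true)
          else (if st.2 then st.1 + 1 else st.1, false))
        (0, true)
      out ++ [pvScores.getD (pvBsearch st.1 0 pvThresholds.length) 0]) []

-- ===== PRECONDITION & SPEC =====
def Spec_score_theory_heuristic_py (questions : List (List (String × String))) (answers : List String) (out : List Int) : Prop := out = score_theory_heuristic_py_alt questions answers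
instance (questions : List (List (String × String))) (answers : List String) (out : List Int) : Decidable (Spec_score_theory_heuristic_py questions answers out) := by unfold Spec_score_theory_heuristic_py; infer_instance

-- ===== CLAIM (what is proved, stated in full; the proofs are below) =====
def Claim_equal_score_theory_heuristic_py : Prop := ∀ (questions : List (List (String × String))) (answers : List String), Dom_score_theory_heuristic_py questions answers → Spec_score_theory_heuristic_py questions answers (score_theory_heuristic_py questions answers)

-- ===== LEMMAS AND PROOFS =====


def pvW : List Char → Bool → Nat
  | [], b => if b then 1 else 0
  | c :: r, b => if PySem.Chars.isspace c then (if b then 1 else 0) + pvW r false else pvW r true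

def pvN : List Char → Bool → Int
  | [], _ => 0
  | c :: r, prev => if PySem.Chars.isspace c then pvN r true else (if prev then 1 else 0) + pvN r false

theorem pv_go_length (s : List Char) : ∀ cur acc,
    (PySem.Chars.split₀.go s cur acc).length = acc.length + pvW s (!cur.isEmpty) := by
  induction s with
  | nil => intro cur acc; by_cases h : cur.isEmpty <;> simp [PySem.Chars.split₀.go, pvW, h]
  | cons c r ih =>
    intro cur acc
    by_cases hs : PySem.Chars.isspace c <;> by_cases h : cur.isEmpty <;>
      simp [PySem.Chars.split₀.go, pvW, hs, h, ih] <;> omega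

theorem pv_split_len (s : List Char) : (PySem.Chars.split₀ s).length = pvW s false := by
  simpa [PySem.Chars.split₀] using pv_go_length s [] []

theorem pv_N_W (s : List Char) : pvN s true = (pvW s false : Int) ∧ pvN s false = (pvW s true : Int) - 1 := by
  induction s with
  | nil => simp [pvN, pvW]
  | cons c r ih =>
    by_cases hs : PySem.Chars.isspace c <;> simp [pvN, pvW, hs, ih.1, ih.2] <;> omega

theorem pv_fold_fst (s : List Char) : ∀ wc prev,
    (s.foldl (fun (st : Int × Bool) c =>
        if PySem.Chars.isspace c then (st.1, true)
        else (if st.2 then st.1 + 1 else st.1, false)) (wc, prev)).1 = wc + pvN s prev := by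
  induction s with
  | nil => simp [pvN]
  | cons c r ih =>
    intro wc prev
    by_cases hs : PySem.Chars.isspace c <;> by_cases hp : prev <;>
      simp [pvN, hs, hp, ih] <;> omega

theorem pv_isspace_lower (c : Char) : PySem.Chars.isspace (PySem.Chars.lowerChar c) = PySem.Chars.isspace c := by
  unfold PySem.Chars.lowerChar
  by_cases h : PySem.Chars.isupper c = true
  · rw [if_pos h]
    unfold PySem.Chars.isupper at h
    simp only [Bool.and_eq_true, decide_eq_true_eq] at h
    obtain ⟨hA', hZ'⟩ := h
    rw [Char.le_def, UInt32.le_iff_toNat_le] at hA' hZ'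
    have hA : 65 ≤ c.toNat := by simpa using hA'
    have hZ : c.toNat ≤ 90 := by simpa using hZ'
    have hv : (Char.ofNat (c.toNat + 32)).toNat = c.toNat + 32 := by
      rw [Char.toNat_ofNat, if_pos]
      unfold Nat.isValidChar
      omega
    unfold PySem.Chars.isspace
    simp only [hv]
    rw [Bool.eq_iff_iff]
    simp only [Bool.or_eq_true, Bool.and_eq_true, decide_eq_true_eq]
    omega
  · rw [if_neg h]

theorem pv_W_lower (s : List Char) : ∀ b, pvW (PySem.Chars.lower s) b = pvW s b := by
  unfold PySem.Chars.lower
  induction s with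
  | nil => intro b; simp [pvW]
  | cons c r ih => intro b; simp only [List.map_cons, pvW, pv_isspace_lower, ih]

theorem pv_W_allspace (u : List Char) (hu : ∀ c ∈ u, PySem.Chars.isspace c = true) :
    ∀ b, pvW u b = if b then 1 else 0 := by
  induction u with
  | nil => intro b; simp [pvW]
  | cons c r ih =>
    intro b
    simp only [pvW, hu c (by simp), if_true]
    rw [ih (fun x hx => hu x (by simp [hx])) false]
    cases b <;> simp

theorem pv_W_append_space (v u : List Char) (hu : ∀ c ∈ u, PySem.Chars.isspace c = true) :
    ∀ b, pvW (v ++ u) b = pvW v b := by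
  induction v with
  | nil => intro b; simp [pvW, pv_W_allspace u hu b]
  | cons c r ih =>
    intro b
    by_cases hs : PySem.Chars.isspace c <;> simp [pvW, hs, ih]

theorem pv_W_space_prefix (u v : List Char) (hu : ∀ c ∈ u, PySem.Chars.isspace c = true) :
    pvW (u ++ v) false = pvW v false := by
  induction u with
  | nil => simp
  | cons c r ih =>
    simp only [List.cons_append, pvW, hu c (by simp), if_true]
    simpa using ih (fun x hx => hu x (by simp [hx]))

theorem pv_W_strip (s : List Char) : pvW (PySem.Chars.strip s) false = pvW s false := by
  unfold PySem.Chars.strip PySem.Chars.rstrip PySem.Chars.lstrip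
  set t := List.dropWhile PySem.Chars.isspace s with ht
  have h1 : pvW t false = pvW s false := by
    conv_rhs => rw [← List.takeWhile_append_dropWhile (p := PySem.Chars.isspace) (l := s)]
    rw [pv_W_space_prefix _ _ (fun c hc => List.mem_takeWhile_imp hc)]
  have h2 : t = (List.dropWhile PySem.Chars.isspace t.reverse).reverse ++ (List.takeWhile PySem.Chars.isspace t.reverse).reverse := by
    rw [← List.reverse_append, List.takeWhile_append_dropWhile, List.reverse_reverse]
  rw [← h1]
  conv_rhs => rw [h2]
  rw [pv_W_append_space _ _ (fun c hc => List.mem_takeWhile_imp (by simpa using hc)) false]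

theorem pv_bsearch_eval (wc : Int) :
    pvScores.getD (pvBsearch wc 0 pvThresholds.length) 0 =
      if wc < 1 then 0 else if wc < 20 then 2 else if wc < 50 then 3 else if wc < 100 then 4 else 5 := by
  show pvScores.getD (pvBsearch wc 0 4) 0 = _
  by_cases h50 : wc < 50 <;> by_cases h20 : wc < 20 <;> by_cases h1 : wc < 1 <;>
    by_cases h100 : wc < 100 <;>
    simp [pvBsearch, pvThresholds, pvScores, h50, h20, h1, h100] <;> omega

-- pointwise: A's cascade on the normalize+split word count = B's table lookup on the scanned count
theorem pv_point (s : String) :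
    (let word_count := PySem.List.len (PySem.Str.split₀ (normalize_text_py (some s)))
     if word_count = 0 then (0 : Int)
     else if word_count < 20 then 2
     else if word_count < 50 then 3
     else if word_count < 100 then 4
     else 5)
    = pvScores.getD
        (pvBsearch
          ((s.toList.foldl
            (fun (st : Int × Bool) c =>
              if PySem.Chars.isspace c then (st.1, true)
              else (if st.2 then st.1 + 1 else st.1, false)) (0, true)).1)
          0 pvThresholds.length) 0 := by
  have hfold : (s.toList.foldl
      (fun (st : Int × Bool) c =>
        if PySem.Chars.isspace c then (st.1, true)
        else (if st.2 then st.1 + 1 else st.1, false)) (0, true)).1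
      = (pvW s.toList false : Int) := by
    rw [pv_fold_fst, (pv_N_W s.toList).1, zero_add]
  have hlen : PySem.List.len (PySem.Str.split₀ (normalize_text_py (some s)))
      = (pvW s.toList false : Int) := by
    rw [PySem.List.len_eq]
    unfold normalize_text_py
    have hmap : (PySem.Str.split₀ (PySem.Str.lower (PySem.Str.strip s))).length
        = (PySem.Chars.split₀ (PySem.Str.lower (PySem.Str.strip s)).toList).length := by
      rw [← PySem.Str.split₀_map_toList, List.length_map]
    rw [hmap, PySem.Str.toList_lower, PySem.Str.toList_strip, pv_split_len,
      pv_W_lower, pv_W_strip]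
  dsimp only
  rw [hfold, hlen, pv_bsearch_eval]
  have h0 : (0 : Int) ≤ (pvW s.toList false : Int) := Int.natCast_nonneg _
  split_ifs <;> omega

-- list-level assembly: A's indexed range loop = B's zip-with-padding loop
theorem pv_main (questions : List (List (String × String))) (answers : List String) :
    score_theory_heuristic_py questions answers = score_theory_heuristic_py_alt questions answers := by
  unfold score_theory_heuristic_py score_theory_heuristic_py_alt
  rw [PySem.List.foldl_append_singleton_eq_map, PySem.List.foldl_append_singleton_eq_map,
    List.nil_append, List.nil_append]
  rw [PySem.List.len_eq questions, PySem.List.pyRange_zero_natCast]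
  rw [List.map_map]
  apply List.ext_getElem
  · simp only [List.length_map, List.length_range, List.length_zip, List.length_append,
      List.length_replicate]
    omega
  · intro k h1 h2
    simp only [List.length_map, List.length_range] at h1
    simp only [List.getElem_map, List.getElem_range, Function.comp, List.getElem_zip]
    have hpad : (answers ++ List.replicate (questions.length - answers.length) "")[k]'(by
        simp only [List.length_map, List.length_zip, List.length_append, List.length_replicate] at h2
        simp only [List.length_append, List.length_replicate]; omega)
        = if k < answers.length then answers.getD k "" else "" := by
      by_cases hka : k < answers.length
      · rw [List.getElem_append_left hka, if_pos hka]
        simp [List.getD, List.getElem?_eq_getElem hka]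
      · rw [List.getElem_append_right (by omega), List.getElem_replicate, if_neg hka]
    rw [hpad]
    by_cases hka : k < answers.length
    · have hc : ((k : Int) < ((answers.length : Nat) : Int)) := by exact_mod_cast hka
      rw [PySem.List.len_eq answers, if_pos hc, PySem.List.pyGetD_natCast, if_pos hka]
      exact pv_point (answers.getD k "")
    · have hc : ¬((k : Int) < ((answers.length : Nat) : Int)) := by exact_mod_cast hka
      rw [PySem.List.len_eq answers, if_neg hc, if_neg hka]
      exact pv_point ""

-- ===== VERDICT (by name: the statement is the Claim_ definition above) =====
theorem score_theory_heuristic_py_spec : Claim_equal_score_theory_heuristic_py := by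
  intro questions answers _
  exact pv_main questions answers
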